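-- pv_equiv track=rewrite | github.com/LINSUISHENG034/WorkDataHubPro | scripts/legacy_semantic_map/closeout.py | mutable_claim_ids
-- ===== SOURCE A (Python) =====
-- def mutable_claim_ids(
--     current_digests: dict[str, str],
--     prior_digests: dict[str, str],
-- ) -> list[str]:
--     mutated = [
--         claim_id
--         for claim_id, digest in prior_digests.items()
--         if current_digests.get(claim_id) != digest
--     ]
--     late_additions = [
--         claim_id for claim_id in current_digests if claim_id not in prior_digests
--     ]
--     return sorted(set(mutated + late_additions))
-- ===== SOURCE B (Python) =====
-- def mutable_claim_ids(
--     current_digests: dict[str, str],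
--     prior_digests: dict[str, str],
-- ) -> list[str]:
--     # Two-pointer merge of the two item lists sorted by claim id: output is
--     # built already sorted, with no dict lookups and no final sort/dedup.
--     cur = sorted(current_digests.items(), key=lambda kv: kv[0])
--     pri = sorted(prior_digests.items(), key=lambda kv: kv[0])
--     out = []
--     i = j = 0
--     while i < len(cur) and j < len(pri):
--         (ck, cv), (pk, pv) = cur[i], pri[j]
--         if ck < pk:
--             out.append(ck)
--             i += 1
--         elif pk < ck:
--             out.append(pk)
--             j += 1
--         else:
--             if cv != pv:
--                 out.append(ck)
--             i += 1
--             j += 1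
--     out.extend(k for k, _ in cur[i:])
--     out.extend(k for k, _ in pri[j:])
--     return out
-- ===== Notes on version B (the rewrite author's own statement) =====
-- stated objective: alternative
-- what changed: Sort both dicts' item lists by claim id once and do a two-pointer merge scan that emits mismatching or one-sided ids in order, instead of A's two filtered comprehensions with per-key dict lookups merged via a set and a final sort of the union.
import Mathlib
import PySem

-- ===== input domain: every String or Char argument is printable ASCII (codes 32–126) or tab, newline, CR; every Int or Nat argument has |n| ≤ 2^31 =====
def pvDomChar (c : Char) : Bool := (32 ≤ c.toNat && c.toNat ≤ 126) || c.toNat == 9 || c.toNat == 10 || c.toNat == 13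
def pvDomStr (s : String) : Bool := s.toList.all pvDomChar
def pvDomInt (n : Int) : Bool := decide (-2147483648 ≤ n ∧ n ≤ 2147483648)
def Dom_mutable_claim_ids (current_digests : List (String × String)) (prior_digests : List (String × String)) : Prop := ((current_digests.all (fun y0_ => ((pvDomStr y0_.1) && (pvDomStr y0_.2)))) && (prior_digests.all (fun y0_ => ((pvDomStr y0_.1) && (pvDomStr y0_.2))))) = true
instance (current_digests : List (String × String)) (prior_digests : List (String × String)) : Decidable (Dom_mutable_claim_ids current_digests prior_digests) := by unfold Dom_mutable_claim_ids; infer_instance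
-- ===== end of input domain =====

-- B sorts both item lists by claim id once and emits the answer by a two-pointer
-- merge scan (already sorted, no dict lookups, no final sort) instead of A's two
-- filtered comprehensions merged through a set union and sorted (alternative).


-- ===== PORT A =====
def mutable_claim_ids (current_digests : List (String × String)) (prior_digests : List (String × String)) : List String :=
  let cur := PySem.Dict.ofList current_digests
  let pri := PySem.Dict.ofList prior_digests
  let mutated := (pri.items.filter (fun p => !(cur.get? p.1 == some p.2))).map (fun p => p.1)
  let late_additions := cur.keys.filter (fun cid => !(pri.contains cid))
  PySem.List.sorted (PySem.Set.ofList (mutated ++ late_additions)) (fun x => x) false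

-- ===== PORT B =====
-- the while loop of Source B: two-pointer merge over the two key-sorted item lists
-- (the trailing `out.extend` tails are the base cases)
def pvMerge : List (String × String) → List (String × String) → List String
  | [], ps => ps.map (fun p => p.1)
  | c :: cs, [] => (c :: cs).map (fun p => p.1)
  | c :: cs, p :: ps =>
    if c.1 < p.1 then c.1 :: pvMerge cs (p :: ps)
    else if p.1 < c.1 then p.1 :: pvMerge (c :: cs) ps
    else if c.2 ≠ p.2 then c.1 :: pvMerge cs ps
    else pvMerge cs ps

def mutable_claim_ids_alt (current_digests : List (String × String)) (prior_digests : List (String × String)) : List String :=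
  let cur := PySem.List.sorted (PySem.Dict.ofList current_digests).items (fun kv => kv.1) false
  let pri := PySem.List.sorted (PySem.Dict.ofList prior_digests).items (fun kv => kv.1) false
  pvMerge cur pri

-- ===== PRECONDITION & SPEC =====
def Spec_mutable_claim_ids (current_digests : List (String × String)) (prior_digests : List (String × String)) (out : List String) : Prop := out = mutable_claim_ids_alt current_digests prior_digests
instance (current_digests : List (String × String)) (prior_digests : List (String × String)) (out : List String) : Decidable (Spec_mutable_claim_ids current_digests prior_digests out) := by unfold Spec_mutable_claim_ids; infer_instance

-- ===== CLAIM (what is proved, stated in full; the proofs are below) =====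
def Claim_equal_mutable_claim_ids : Prop := ∀ (current_digests : List (String × String)) (prior_digests : List (String × String)), Dom_mutable_claim_ids current_digests prior_digests → Spec_mutable_claim_ids current_digests prior_digests (mutable_claim_ids current_digests prior_digests)

-- ===== LEMMAS AND PROOFS =====

-- first-match association lookup in a pair list
def pvAssoc (l : List (String × String)) (x : String) : Option String :=
  match l with
  | [] => none
  | p :: t => if p.1 = x then some p.2 else pvAssoc t x

theorem pvAssoc_cons_self (p : String × String) (t : List (String × String)) :
    pvAssoc (p :: t) p.1 = some p.2 := by simp [pvAssoc]

theorem pvAssoc_cons_ne (p : String × String) (t : List (String × String)) (x : String)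
    (h : ¬ p.1 = x) : pvAssoc (p :: t) x = pvAssoc t x := by simp [pvAssoc, h]

theorem pvAssoc_eq_none_iff (l : List (String × String)) (x : String) :
    pvAssoc l x = none ↔ x ∉ l.map Prod.fst := by
  induction l with
  | nil => simp [pvAssoc]
  | cons p t ih =>
    simp only [pvAssoc, List.map_cons, List.mem_cons]
    split_ifs with h
    · simp [h]
    · have hx : ¬ x = p.1 := fun e => h e.symm
      rw [ih]; simp [hx]

theorem pvAssoc_ne_none_iff (l : List (String × String)) (x : String) :
    pvAssoc l x ≠ none ↔ x ∈ l.map Prod.fst := by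
  rw [Ne, pvAssoc_eq_none_iff, not_not]

theorem pvAssoc_mem_of_eq_some (l : List (String × String)) (x v : String)
    (h : pvAssoc l x = some v) : (x, v) ∈ l := by
  induction l with
  | nil => simp [pvAssoc] at h
  | cons p t ih =>
    simp only [pvAssoc] at h
    split_ifs at h with hp
    · cases h; rw [List.mem_cons]; left; rw [← hp]
    · exact List.mem_cons_of_mem _ (ih h)

-- a key below the head of a key-sorted list is absent
theorem pvAssoc_eq_none_of_lt (l : List (String × String)) (q : String × String)
    (hp : (q :: l).Pairwise (fun a b => a.1 < b.1)) (y : String) (hy : y < q.1) :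
    pvAssoc (q :: l) y = none := by
  rw [pvAssoc_eq_none_iff]
  intro hm
  simp only [List.map_cons, List.mem_cons, List.mem_map] at hm
  rcases hm with h | ⟨r, hr, he⟩
  · exact absurd (h ▸ hy) (lt_irrefl _)
  · have h2 := (List.pairwise_cons.mp hp).1 r hr
    exact absurd (he ▸ (hy.trans h2)) (lt_irrefl _)

-- every emitted element is a key of one of the two lists
theorem pvMerge_mem_keys (cs ps : List (String × String)) (x : String)
    (h : x ∈ pvMerge cs ps) : x ∈ cs.map Prod.fst ∨ x ∈ ps.map Prod.fst := by
  fun_induction pvMerge cs ps with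
  | case1 ps => exact Or.inr h
  | case2 c cs => exact Or.inl h
  | case3 c cs p ps hlt ih =>
    rcases List.mem_cons.mp h with hx | hx
    · exact Or.inl (by simp [hx])
    · rcases ih hx with h1 | h1
      · exact Or.inl (List.mem_cons_of_mem _ h1)
      · exact Or.inr h1
  | case4 c cs p ps h1 hlt ih =>
    rcases List.mem_cons.mp h with hx | hx
    · exact Or.inr (by simp [hx])
    · rcases ih hx with h2 | h2
      · exact Or.inl h2
      · exact Or.inr (List.mem_cons_of_mem _ h2)
  | case5 c cs p ps h1 h2 hne ih =>
    rcases List.mem_cons.mp h with hx | hx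
    · exact Or.inl (by simp [hx])
    · rcases ih hx with h3 | h3
      · exact Or.inl (List.mem_cons_of_mem _ h3)
      · exact Or.inr (List.mem_cons_of_mem _ h3)
  | case6 c cs p ps h1 h2 hne ih =>
    rcases ih h with h3 | h3
    · exact Or.inl (List.mem_cons_of_mem _ h3)
    · exact Or.inr (List.mem_cons_of_mem _ h3)

-- membership in the merge output: exactly the ids whose first-match lookups disagree
theorem pvMerge_mem_iff (cs ps : List (String × String)) (x : String) :
    cs.Pairwise (fun a b => a.1 < b.1) → ps.Pairwise (fun a b => a.1 < b.1) →
    (x ∈ pvMerge cs ps ↔ pvAssoc cs x ≠ pvAssoc ps x) := by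
  fun_induction pvMerge cs ps with
  | case1 ps =>
    intro _ _
    have h0 : pvAssoc [] x = none := rfl
    rw [h0, ne_comm, pvAssoc_ne_none_iff]
  | case2 c cs =>
    intro _ _
    have h0 : pvAssoc [] x = none := rfl
    rw [h0, pvAssoc_ne_none_iff]
  | case3 c cs p ps hlt ih =>
    intro hc hp
    by_cases hx : x = c.1
    · subst hx
      rw [pvAssoc_cons_self, pvAssoc_eq_none_of_lt ps p hp c.1 hlt]
      simp
    · have hne : ¬ c.1 = x := fun e => hx e.symm
      rw [pvAssoc_cons_ne c cs x hne, List.mem_cons]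
      simp only [hx, false_or]
      exact ih (hc.of_cons) hp
  | case4 c cs p ps h1 hlt ih =>
    intro hc hp
    by_cases hx : x = p.1
    · subst hx
      rw [pvAssoc_cons_self, pvAssoc_eq_none_of_lt cs c hc p.1 hlt]
      simp
    · have hne : ¬ p.1 = x := fun e => hx e.symm
      rw [pvAssoc_cons_ne p ps x hne, List.mem_cons]
      simp only [hx, false_or]
      exact ih hc (hp.of_cons)
  | case5 c cs p ps h1 h2 hne ih =>
    intro hc hp
    have heq : c.1 = p.1 := le_antisymm (not_lt.mp h2) (not_lt.mp h1)
    by_cases hx : x = c.1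
    · subst hx
      have hb : pvAssoc (p :: ps) c.1 = some p.2 := by rw [heq]; exact pvAssoc_cons_self _ _
      rw [pvAssoc_cons_self, hb]
      simp [hne]
    · have hnc : ¬ c.1 = x := fun e => hx e.symm
      have hnp : ¬ p.1 = x := fun e => hx (heq ▸ e.symm ▸ rfl)
      rw [pvAssoc_cons_ne c cs x hnc, pvAssoc_cons_ne p ps x hnp, List.mem_cons]
      simp only [hx, false_or]
      exact ih (hc.of_cons) (hp.of_cons)
  | case6 c cs p ps h1 h2 hvv ih =>
    intro hc hp
    have heq : c.1 = p.1 := le_antisymm (not_lt.mp h2) (not_lt.mp h1)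
    have hv : c.2 = p.2 := not_ne_iff.mp hvv
    by_cases hx : x = c.1
    · subst hx
      have hb : pvAssoc (p :: ps) c.1 = some p.2 := by rw [heq]; exact pvAssoc_cons_self _ _
      rw [pvAssoc_cons_self, hb, hv]
      constructor
      · intro hm
        exfalso
        rcases pvMerge_mem_keys cs ps c.1 hm with h | h
        · rcases List.mem_map.mp h with ⟨r, hr, he⟩
          exact absurd (he ▸ (List.pairwise_cons.mp hc).1 r hr) (lt_irrefl _)
        · rcases List.mem_map.mp h with ⟨r, hr, he⟩
          have h3 := (List.pairwise_cons.mp hp).1 r hr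
          rw [← heq] at h3
          exact absurd (he ▸ h3) (lt_irrefl _)
      · intro hd; exact absurd rfl hd
    · have hnc : ¬ c.1 = x := fun e => hx e.symm
      have hnp : ¬ p.1 = x := fun e => hx (heq ▸ e.symm ▸ rfl)
      rw [pvAssoc_cons_ne c cs x hnc, pvAssoc_cons_ne p ps x hnp]
      exact ih (hc.of_cons) (hp.of_cons)

-- the merge output is strictly increasing
theorem pvMerge_pairwise (cs ps : List (String × String)) :
    cs.Pairwise (fun a b => a.1 < b.1) → ps.Pairwise (fun a b => a.1 < b.1) →
    (pvMerge cs ps).Pairwise (· < ·) := by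
  fun_induction pvMerge cs ps with
  | case1 ps => intro _ hp; exact List.pairwise_map.mpr hp
  | case2 c cs => intro hc _; exact List.pairwise_map.mpr hc
  | case3 c cs p ps hlt ih =>
    intro hc hp
    rw [List.pairwise_cons]
    refine ⟨?_, ih hc.of_cons hp⟩
    intro y hy
    rcases pvMerge_mem_keys _ _ _ hy with h | h
    · rcases List.mem_map.mp h with ⟨r, hr, he⟩
      exact he ▸ (List.pairwise_cons.mp hc).1 r hr
    · rcases List.mem_map.mp h with ⟨r, hr, he⟩
      rcases List.mem_cons.mp hr with h1 | h1
      · exact he ▸ h1 ▸ hlt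
      · exact he ▸ (hlt.trans ((List.pairwise_cons.mp hp).1 r h1))
  | case4 c cs p ps h1 hlt ih =>
    intro hc hp
    rw [List.pairwise_cons]
    refine ⟨?_, ih hc hp.of_cons⟩
    intro y hy
    rcases pvMerge_mem_keys _ _ _ hy with h | h
    · rcases List.mem_map.mp h with ⟨r, hr, he⟩
      rcases List.mem_cons.mp hr with h2 | h2
      · exact he ▸ h2 ▸ hlt
      · exact he ▸ (hlt.trans ((List.pairwise_cons.mp hc).1 r h2))
    · rcases List.mem_map.mp h with ⟨r, hr, he⟩
      exact he ▸ (List.pairwise_cons.mp hp).1 r hr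
  | case5 c cs p ps h1 h2 hne ih =>
    intro hc hp
    have heq : c.1 = p.1 := le_antisymm (not_lt.mp h2) (not_lt.mp h1)
    rw [List.pairwise_cons]
    refine ⟨?_, ih hc.of_cons hp.of_cons⟩
    intro y hy
    rcases pvMerge_mem_keys _ _ _ hy with h | h
    · rcases List.mem_map.mp h with ⟨r, hr, he⟩
      exact he ▸ (List.pairwise_cons.mp hc).1 r hr
    · rcases List.mem_map.mp h with ⟨r, hr, he⟩
      have h3 := (List.pairwise_cons.mp hp).1 r hr
      rw [heq]
      exact he ▸ h3
  | case6 c cs p ps h1 h2 hne ih =>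
    intro hc hp
    exact ih hc.of_cons hp.of_cons

-- ≤-sorted with distinct keys is <-sorted
theorem pv_strict_of_le_nodup (l : List (String × String))
    (hle : l.Pairwise (fun a b => a.1 ≤ b.1)) (hnd : (l.map Prod.fst).Nodup) :
    l.Pairwise (fun a b => a.1 < b.1) := by
  have h2 : l.Pairwise (fun a b => a.1 ≠ b.1) := List.pairwise_map.mp hnd
  exact (hle.and h2).imp (fun h => lt_of_le_of_ne h.1 h.2)

-- first-match lookup in any nodup-keys rearrangement of d.items is d.get?
theorem pv_get?_eq_pvAssoc (d : PySem.Dict String String) (l : List (String × String))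
    (hperm : l.Perm d.items) (hnd : d.keys.Nodup) (x : String) :
    d.get? x = pvAssoc l x := by
  cases h : pvAssoc l x with
  | some v =>
    exact PySem.Dict.get?_of_mem_items d (hperm.subset (pvAssoc_mem_of_eq_some l x v h)) hnd
  | none =>
    have hx : x ∉ l.map Prod.fst := (pvAssoc_eq_none_iff l x).mp h
    have hk : x ∉ d.keys := by
      intro hkm
      apply hx
      have hm : x ∈ d.items.map Prod.fst := by
        simpa [PySem.Dict.keys] using hkm
      exact ((hperm.map Prod.fst).mem_iff).mpr hm
    exact (PySem.Dict.get?_eq_none_iff_not_mem_keys d x).mpr hk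

-- A's pre-sort list holds exactly the ids where the two dict lookups disagree
theorem pvA_mem_iff (cur pri : PySem.Dict String String) (hP : pri.keys.Nodup) (x : String) :
    (x ∈ PySem.Set.ofList
        ((pri.items.filter (fun p => !(cur.get? p.1 == some p.2))).map (fun p => p.1) ++
          cur.keys.filter (fun cid => !(pri.contains cid)))) ↔
    ¬ (cur.get? x = pri.get? x) := by
  simp only [PySem.Set.mem_ofList, List.mem_append, List.mem_filter, List.mem_map]
  cases h : pri.get? x with
  | some v =>
    constructor
    · rintro (⟨p, ⟨hpi, hpf⟩, hpx⟩ | hlate)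
      · have hpv : pri.get? p.1 = some p.2 := PySem.Dict.get?_of_mem_items pri hpi hP
        rw [hpx, h] at hpv
        have hv : p.2 = v := (Option.some.inj hpv).symm
        rw [hpx, hv] at hpf
        simp only [Bool.not_eq_eq_eq_not, Bool.not_true, beq_eq_false_iff_ne] at hpf
        intro he; rw [he] at hpf; exact hpf rfl
      · have hcont : pri.contains x = true := by
          rw [PySem.Dict.contains_eq_isSome_get?, h]; rfl
        rw [hcont] at hlate
        simp at hlate
    · intro hne
      left
      refine ⟨(x, v), ⟨PySem.Dict.mem_items_of_get?_eq_some pri h, ?_⟩, rfl⟩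
      simp only [Bool.not_eq_eq_eq_not, Bool.not_true, beq_eq_false_iff_ne]
      intro he; exact hne (h ▸ he)
  | none =>
    have hxk : x ∉ pri.keys := (PySem.Dict.get?_eq_none_iff_not_mem_keys pri x).mp h
    have hcont : pri.contains x = false := by
      rw [PySem.Dict.contains_eq_isSome_get?, h]; rfl
    constructor
    · rintro (⟨p, ⟨hpi, _⟩, hpx⟩ | ⟨hk, _⟩)
      · have hpv : pri.get? p.1 = some p.2 := PySem.Dict.get?_of_mem_items pri hpi hP
        rw [hpx, h] at hpv
        cases hpv
      · intro he
        have : cur.get? x = none := by rw [he]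
        exact ((PySem.Dict.get?_eq_none_iff_not_mem_keys cur x).mp this) hk
    · intro hne
      right
      refine ⟨?_, by rw [hcont]; rfl⟩
      cases hc : cur.get? x with
      | none => exact absurd hc hne
      | some w =>
        have := PySem.Dict.mem_items_of_get?_eq_some cur hc
        exact PySem.Dict.mem_keys_of_mem_items cur this

-- the two implementations agree
theorem pv_main (c p : List (String × String)) :
    mutable_claim_ids c p = mutable_claim_ids_alt c p := by
  unfold mutable_claim_ids mutable_claim_ids_alt
  have hCnd : (PySem.Dict.ofList c).keys.Nodup := PySem.Dict.nodup_keys_ofList _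
  have hPnd : (PySem.Dict.ofList p).keys.Nodup := PySem.Dict.nodup_keys_ofList _
  have hperm1 := PySem.List.sorted_perm (PySem.Dict.ofList c).items (fun kv => kv.1) false
  have hperm2 := PySem.List.sorted_perm (PySem.Dict.ofList p).items (fun kv => kv.1) false
  have h1nd : ((PySem.List.sorted (PySem.Dict.ofList c).items (fun kv => kv.1) false).map Prod.fst).Nodup := by
    rw [(hperm1.map Prod.fst).nodup_iff]
    simpa [PySem.Dict.keys] using hCnd
  have h2nd : ((PySem.List.sorted (PySem.Dict.ofList p).items (fun kv => kv.1) false).map Prod.fst).Nodup := by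
    rw [(hperm2.map Prod.fst).nodup_iff]
    simpa [PySem.Dict.keys] using hPnd
  have h1lt := pv_strict_of_le_nodup _ (PySem.List.sorted_pairwise (PySem.Dict.ofList c).items (fun kv => kv.1)) h1nd
  have h2lt := pv_strict_of_le_nodup _ (PySem.List.sorted_pairwise (PySem.Dict.ofList p).items (fun kv => kv.1)) h2nd
  apply PySem.List.sorted_eq_of_perm_of_pairwise_lt
  · rw [List.perm_ext_iff_of_nodup
        ((pvMerge_pairwise _ _ h1lt h2lt).imp (fun h => ne_of_lt h))
        (PySem.Set.nodup_ofList _)]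
    intro x
    rw [pvMerge_mem_iff _ _ x h1lt h2lt,
        ← pv_get?_eq_pvAssoc (PySem.Dict.ofList c) _ hperm1 hCnd x,
        ← pv_get?_eq_pvAssoc (PySem.Dict.ofList p) _ hperm2 hPnd x,
        pvA_mem_iff (PySem.Dict.ofList c) (PySem.Dict.ofList p) hPnd x]
  · exact pvMerge_pairwise _ _ h1lt h2lt

-- ===== VERDICT (by name: the statement is the Claim_ definition above) =====
theorem mutable_claim_ids_spec : Claim_equal_mutable_claim_ids := by
  intro c p _
  show mutable_claim_ids c p = mutable_claim_ids_alt c p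
  exact pv_main c p
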